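-- pv_equiv track=rewrite | github.com/SterreStorm/AOC2022 | day08.py | find_coord
-- ===== SOURCE A (Python) =====
-- def find_coord(grid, direction: int):
--     tree_coordinates = []
--     for row in grid:
--         y = grid.index(row)
--         if direction == - 1:
--             row = list(reversed(row))
--
--         for i in range(len(row)):
--             bigger = True
--             value = row[i]
--             for element in row[i + 1: len(row)]:
--                 if value <= element:
--                     bigger = False
--
--             if bigger:
--                 if direction == -1:
--                     i = len(row) - i - 1
--                 tree_coordinates.append((i, y))
--
--     return tree_coordinates
-- ===== SOURCE B (Python) =====
-- def find_coord(grid, direction):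
--     # Single pass per row keeping a running maximum; y from enumerate (A's
--     # grid.index gives the wrong y for a repeated row -- see D_).
--     coords = []
--     for y, row in enumerate(grid):
--         if direction == -1:
--             indices = range(len(row))
--         else:
--             indices = range(len(row) - 1, -1, -1)
--         best = None
--         picks = []
--         for x in indices:
--             v = row[x]
--             if best is None or v > best:
--                 picks.append(x)
--                 best = v
--         picks.reverse()
--         coords.extend((x, y) for x in picks)
--     return coords
-- ===== Notes on version B (the rewrite author's own statement) =====
-- stated objective: faster
-- what changed: replaces A's per-element rescan of the row suffix (plus a grid.index scan per row) by a single running-maximum sweep per row with enumerate supplying y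
-- intended difference: on grids containing a duplicated nonempty row A tags every copy with the first occurrence's row index (grid.index), while B tags each row with its own index via enumerate, which is the intended coordinate — e.g. on find_coord([[1], [1]], 0): A returns [(0, 0), (0, 0)], B returns [(0, 0), (0, 1)]
import Mathlib
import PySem

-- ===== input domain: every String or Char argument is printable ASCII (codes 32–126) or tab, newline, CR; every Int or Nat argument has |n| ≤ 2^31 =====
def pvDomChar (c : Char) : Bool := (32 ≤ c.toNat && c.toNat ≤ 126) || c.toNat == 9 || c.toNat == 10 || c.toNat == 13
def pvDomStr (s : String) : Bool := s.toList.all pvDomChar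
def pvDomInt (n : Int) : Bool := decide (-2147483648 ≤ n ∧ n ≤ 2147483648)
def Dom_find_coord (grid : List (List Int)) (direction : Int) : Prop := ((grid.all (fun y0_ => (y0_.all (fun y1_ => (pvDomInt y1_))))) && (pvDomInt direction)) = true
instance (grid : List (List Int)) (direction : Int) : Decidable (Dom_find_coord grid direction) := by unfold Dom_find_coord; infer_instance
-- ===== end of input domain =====

-- B is one running-maximum sweep per row instead of A's rescan of every suffix; equal outside D_ (duplicated nonempty rows), where B's per-row y is the intended one.

-- ===== PORT A =====
def find_coord (grid : List (List Int)) (direction : Int) : List (Int × Int) :=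
  grid.foldl (fun acc row0 =>
    -- y = grid.index(row): row0 is an element of grid, so index? is always some; getD 0 is exact
    let y : Int := ((PySem.List.index? grid row0).getD 0 : Nat)
    let row := if direction = -1 then row0.reverse else row0
    (PySem.List.pyRange 0 (row.length : Int) 1).foldl (fun acc i =>
      -- row[i]: i ranges over 0..len-1, in range; getD 0 is exact
      let value := (PySem.List.pyGet? row i).getD 0
      let bigger := (PySem.List.slice row (some (i + 1)) (some (row.length : Int))).foldl
        (fun b element => if value ≤ element then false else b) true
      if bigger then
        acc ++ [(if direction = -1 then (row.length : Int) - i - 1 else i, y)]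
      else acc) acc) []

-- ===== PORT B =====
def find_coord_alt (grid : List (List Int)) (direction : Int) : List (Int × Int) :=
  (PySem.List.enumerate grid 0).foldl (fun coords p =>
    let y := p.1
    let row := p.2
    let indices := if direction = -1 then PySem.List.pyRange 0 (row.length : Int) 1
                   else PySem.List.pyRange ((row.length : Int) - 1) (-1) (-1)
    let st := indices.foldl (fun (st : Option Int × List Int) x =>
      -- row[x]: every produced index is in range; getD 0 is exact
      let v := (PySem.List.pyGet? row x).getD 0
      match st.1 with
      | none => (some v, st.2 ++ [x])
      | some b => if v > b then (some v, st.2 ++ [x]) else st) ((none : Option Int), ([] : List Int))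
    coords ++ st.2.reverse.map (fun x => (x, y))) []

-- ===== PRECONDITION & SPEC =====
-- On grids containing a duplicated nonempty row, A labels every copy with the first copy's
-- row index (grid.index); B labels each row with its own index, the intended coordinate.
def D_find_coord (grid : List (List Int)) (direction : Int) : Prop :=
  ∃ r ∈ grid, r ≠ [] ∧ 2 ≤ grid.count r
instance (grid : List (List Int)) (direction : Int) : Decidable (D_find_coord grid direction) := by
  unfold D_find_coord; infer_instance

def Spec_find_coord (grid : List (List Int)) (direction : Int) (out : List (Int × Int)) : Prop :=
  ¬ D_find_coord grid direction → out = find_coord_alt grid direction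
instance (grid : List (List Int)) (direction : Int) (out : List (Int × Int)) : Decidable (Spec_find_coord grid direction out) := by unfold Spec_find_coord; infer_instance

def pvDiffWitness_find_coord : List (List Int) × Int := ([[1], [1]], 0)
def pvDiffWitnessOut_find_coord : (List (Int × Int)) × (List (Int × Int)) :=
  ([(0, 0), (0, 0)], [(0, 0), (0, 1)])

-- ===== CLAIM (what is proved, stated in full; the proofs are below) =====
def Claim_unchanged_find_coord : Prop := ∀ (grid : List (List Int)) (direction : Int), Dom_find_coord grid direction → Spec_find_coord grid direction (find_coord grid direction)
def Claim_changed_find_coord : Prop := Dom_find_coord (pvDiffWitness_find_coord.1) (pvDiffWitness_find_coord.2) ∧ D_find_coord (pvDiffWitness_find_coord.1) (pvDiffWitness_find_coord.2) ∧ find_coord (pvDiffWitness_find_coord.1) (pvDiffWitness_find_coord.2) = pvDiffWitnessOut_find_coord.1 ∧ find_coord_alt (pvDiffWitness_find_coord.1) (pvDiffWitness_find_coord.2) = pvDiffWitnessOut_find_coord.2 ∧ pvDiffWitnessOut_find_coord.1 ≠ pvDiffWitnessOut_find_coord.2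

def Claim_exact_find_coord : Prop := ∀ (grid : List (List Int)) (direction : Int), Dom_find_coord grid direction → D_find_coord grid direction → find_coord grid direction ≠ find_coord_alt grid direction

-- ===== LEMMAS AND PROOFS =====

-- "element is strictly greater than everything after it" (A's bigger, B's pick test)
def condS (row : List Int) (i : Nat) : Bool := (row.drop (i + 1)).all (fun e => decide (e < row.getD i 0))
-- "element is strictly greater than everything before it" (direction = -1)
def condP (row : List Int) (i : Nat) : Bool := (row.take i).all (fun e => decide (e < row.getD i 0))

-- per-row output, suffix form (ascending) and prefix form (descending)
def blkS (row : List Int) (y : Int) : List (Int × Int) :=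
  ((List.range row.length).filter (condS row)).map (fun (k : Nat) => ((k : Int), y))
def blkP (row : List Int) (y : Int) : List (Int × Int) :=
  (((List.range row.length).filter (condP row)).reverse).map (fun (k : Nat) => ((k : Int), y))

-- running maximum (proof-side)
def Mf (xs : List Int) : Option Int := xs.foldl (fun o e => some (o.elim e (fun b => max b e))) none

theorem Mf_append (xs : List Int) (a : Int) :
    Mf (xs ++ [a]) = some ((Mf xs).elim a (fun b => max b a)) := by
  simp [Mf, List.foldl_append]

theorem Mf_all (xs : List Int) (v : Int) :
    xs.all (fun e => decide (e < v)) = (Mf xs).elim true (fun b => decide (b < v)) := by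
  induction xs using List.reverseRecOn with
  | nil => simp [Mf]
  | append_singleton xs a ih =>
    rw [Mf_append]
    rcases h : Mf xs with _ | b
    · rw [h] at ih; simp at ih; simp [ih]
      exact fun _ => ih
    · rw [h] at ih
      simp only [List.all_append, ih, Option.elim, List.all_cons, List.all_nil, Bool.and_true]
      rw [← Bool.decide_and, decide_eq_decide, max_lt_iff]

-- A's inner "bigger" scan is an all-test
theorem foldl_le_false (v : Int) (xs : List Int) (b : Bool) :
    xs.foldl (fun b e => if v ≤ e then false else b) b = (b && xs.all (fun e => decide (e < v))) := by
  induction xs generalizing b with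
  | nil => simp
  | cons a xs ih =>
    simp only [List.foldl_cons, List.all_cons]
    by_cases h : v ≤ a
    · rw [if_pos h, ih]; simp [show ¬ a < v by omega]
    · rw [if_neg h, ih]; simp [show a < v by omega]


-- A's inner loop over one row, with e the emitted index transformation
theorem A_inner (row : List Int) (y : Int) (e : Int → Int) (acc : List (Int × Int)) :
    (PySem.List.pyRange 0 (row.length : Int) 1).foldl (fun acc i =>
      let value := (PySem.List.pyGet? row i).getD 0
      let bigger := (PySem.List.slice row (some (i + 1)) (some (row.length : Int))).foldl
        (fun b element => if value ≤ element then false else b) true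
      if bigger then acc ++ [(e i, y)] else acc) acc
    = acc ++ ((List.range row.length).filter (condS row)).map (fun (k : Nat) => (e (k : Int), y)) := by
  rw [PySem.List.pyRange_zero_natCast, List.foldl_map]
  have h : ∀ (acc : List (Int × Int)) (k : Nat), k ∈ List.range row.length →
      (fun acc (i : Int) =>
        let value := (PySem.List.pyGet? row i).getD 0
        let bigger := (PySem.List.slice row (some (i + 1)) (some (row.length : Int))).foldl
          (fun b element => if value ≤ element then false else b) true
        if bigger then acc ++ [(e i, y)] else acc) acc (k : Int)
      = (fun acc (k : Nat) => if condS row k then acc ++ [(e (k : Int), y)] else acc) acc k := by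
    intro acc k _
    have hs : PySem.List.slice row (some ((k : Int) + 1)) (some (row.length : Int)) = row.drop (k + 1) := by
      have h1 : ((k : Int) + 1) = ((k + 1 : Nat) : Int) := by push_cast; ring
      rw [h1, PySem.List.slice_natCast]
      exact List.take_of_length_le (by simp)
    simp only [PySem.List.pyGet?_natCast, hs, foldl_le_false, Bool.true_and, condS,
      List.getD_eq_getElem?_getD]
  rw [PySem.List.foldl_congr_mem _ _ _ _ (fun acc x hx => h acc x hx),
    PySem.List.foldl_append_if]

-- reversing a row swaps condS for condP under index reversal
theorem reverse_range_map (n : Nat) :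
    (List.range n).reverse = (List.range n).map (fun i => n - 1 - i) := by
  apply List.ext_getElem
  · simp
  · intro i h1 h2
    simp [List.getElem_reverse]

theorem condS_reverse (row : List Int) (i : Nat) (hi : i < row.length) :
    condS row.reverse i = condP row (row.length - 1 - i) := by
  unfold condS condP
  rw [List.drop_reverse, List.all_reverse]
  have h1 : row.length - (i + 1) = row.length - 1 - i := by omega
  have h2 : row.reverse.getD i 0 = row.getD (row.length - 1 - i) 0 := by
    rw [List.getD_eq_getElem?_getD, List.getD_eq_getElem?_getD,
      List.getElem?_eq_getElem (by simpa using hi),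
      List.getElem?_eq_getElem (by omega)]
    simp [List.getElem_reverse]
  rw [h1, h2]

-- A's reversed-row block equals the prefix block
theorem blk_reverse (row : List Int) (y : Int) :
    ((List.range row.reverse.length).filter (condS row.reverse)).map
        (fun (k : Nat) => ((row.reverse.length : Int) - (k : Int) - 1, y))
    = blkP row y := by
  unfold blkP
  rw [List.length_reverse]
  set n := row.length with hn
  have hf : (List.range n).filter (condS row.reverse)
      = (List.range n).filter (fun k => condP row (n - 1 - k)) :=
    List.filter_congr (fun k hk => condS_reverse row k (by simpa using hk))
  rw [hf]
  have h2 : ((List.range n).filter (condP row)).reverse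
      = ((List.range n).filter (fun k => condP row (n - 1 - k))).map (fun k => n - 1 - k) := by
    rw [← List.filter_reverse, reverse_range_map, List.filter_map]
    rfl
  rw [h2, List.map_map]
  apply List.map_congr_left
  intro k hk
  have : k < n := by simpa using List.mem_range.mp (List.mem_of_mem_filter hk)
  simp only [Function.comp]
  congr 1
  omega


-- B's forward running-maximum scan (direction = -1)
theorem scanF (row : List Int) (k : Nat) (hk : k ≤ row.length) :
    ((List.range' 0 k).map (fun (i : Nat) => (i : Int))).foldl (fun (st : Option Int × List Int) x =>
      let v := (PySem.List.pyGet? row x).getD 0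
      match st.1 with
      | none => (some v, st.2 ++ [x])
      | some b => if v > b then (some v, st.2 ++ [x]) else st) ((none : Option Int), ([] : List Int))
    = (Mf (row.take k), ((List.range' 0 k).filter (condP row)).map (fun (i : Nat) => (i : Int))) := by
  induction k with
  | zero => simp [Mf]
  | succ k ih =>
    have hkl : k < row.length := by omega
    have hc : List.range' 0 (k + 1) = List.range' 0 k ++ [k] := by
      simpa using List.range'_concat (s := 0) (n := k) (step := 1)
    rw [hc, List.map_append, List.foldl_append, ih (by omega), List.filter_append]
    have htake : row.take (k + 1) = row.take k ++ [row[k]] := by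
      rw [List.take_succ, List.getElem?_eq_getElem hkl]
      rfl
    have hv : (PySem.List.pyGet? row ((k : Nat) : Int)).getD 0 = row[k] := by
      simp [List.getElem?_eq_getElem hkl]
    have hcond : condP row k = (Mf (row.take k)).elim true (fun b => decide (b < row[k])) := by
      unfold condP
      rw [Mf_all]
      congr 1
      rw [List.getD_eq_getElem?_getD, List.getElem?_eq_getElem hkl]
      rfl
    rcases hM : Mf (row.take k) with _ | b
    · simp only [List.foldl_cons, List.foldl_nil, List.map_cons, List.map_nil, hv, hM,
        htake, Mf_append, Option.elim]
      rw [hM] at hcond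
      simp only [Option.elim] at hcond
      simp [List.filter_cons, hcond]
    · rw [hM] at hcond
      simp only [Option.elim] at hcond
      by_cases hb : row[k] > b
      · simp only [List.foldl_cons, List.foldl_nil, List.map_cons, List.map_nil, hv, hM,
          htake, Mf_append, Option.elim]
        simp [List.filter_cons, hcond, hb, max_eq_right (le_of_lt hb)]
      · simp only [List.foldl_cons, List.foldl_nil, List.map_cons, List.map_nil, hv, hM,
          htake, Mf_append, Option.elim]
        have hnb : ¬ (b < row[k]) := hb
        simp [List.filter_cons, hcond, hb, max_eq_left (by omega : row[k] ≤ b), hnb]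

-- B's backward running-maximum scan (direction ≠ -1)
theorem scanBk (row : List Int) : ∀ (m k : Nat), k + m = row.length →
    (((List.range' k m).reverse).map (fun (i : Nat) => (i : Int))).foldl (fun (st : Option Int × List Int) x =>
      let v := (PySem.List.pyGet? row x).getD 0
      match st.1 with
      | none => (some v, st.2 ++ [x])
      | some b => if v > b then (some v, st.2 ++ [x]) else st) ((none : Option Int), ([] : List Int))
    = (Mf ((row.drop k).reverse), (((List.range' k m).filter (condS row)).reverse).map (fun (i : Nat) => (i : Int))) := by
  intro m
  induction m with
  | zero =>
    intro k hk
    rw [List.drop_of_length_le (by omega)]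
    simp [Mf]
  | succ m ih =>
    intro k hk
    have hkl : k < row.length := by omega
    rw [List.range'_succ, List.reverse_cons, List.map_append, List.foldl_append,
      ih (k + 1) (by omega)]
    have hdropk : row.drop k = row[k] :: row.drop (k + 1) := List.drop_eq_getElem_cons hkl
    have hrev : (row.drop k).reverse = (row.drop (k + 1)).reverse ++ [row[k]] := by
      rw [hdropk, List.reverse_cons]
    have hv : (PySem.List.pyGet? row ((k : Nat) : Int)).getD 0 = row[k] := by
      simp [List.getElem?_eq_getElem hkl]
    have hcond : condS row k
        = (Mf ((row.drop (k + 1)).reverse)).elim true (fun b => decide (b < row[k])) := by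
      unfold condS
      rw [← List.all_reverse, Mf_all]
      congr 1
      rw [List.getD_eq_getElem?_getD, List.getElem?_eq_getElem hkl]
      rfl
    rcases hM : Mf ((row.drop (k + 1)).reverse) with _ | b
    · rw [hM] at hcond
      simp only [Option.elim] at hcond
      simp only [List.foldl_cons, List.foldl_nil, List.map_cons, List.map_nil, hv, hM,
        hrev, Mf_append, Option.elim]
      simp [List.filter_cons, hcond, hM]
    · rw [hM] at hcond
      simp only [Option.elim] at hcond
      by_cases hb : row[k] > b
      · simp only [List.foldl_cons, List.foldl_nil, List.map_cons, List.map_nil, hv, hM,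
          hrev, Mf_append, Option.elim]
        simp [List.filter_cons, hcond, hb, hM, max_eq_right (le_of_lt hb)]
      · have hnb : ¬ (b < row[k]) := hb
        simp only [List.foldl_cons, List.foldl_nil, List.map_cons, List.map_nil, hv, hM,
          hrev, Mf_append, Option.elim]
        simp [List.filter_cons, hcond, hb, hM, max_eq_left (by omega : row[k] ≤ b), hnb]

def rowBlk (direction : Int) (row : List Int) (y : Int) : List (Int × Int) :=
  if direction = -1 then blkP row y else blkS row y

-- B's grid fold produces the concatenation of per-row blocks
theorem Bfold (direction : Int) (l : List (Int × List Int)) (coords : List (Int × Int)) :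
    l.foldl (fun coords p =>
      let y := p.1
      let row := p.2
      let indices := if direction = -1 then PySem.List.pyRange 0 (row.length : Int) 1
                     else PySem.List.pyRange ((row.length : Int) - 1) (-1) (-1)
      let st := indices.foldl (fun (st : Option Int × List Int) x =>
        let v := (PySem.List.pyGet? row x).getD 0
        match st.1 with
        | none => (some v, st.2 ++ [x])
        | some b => if v > b then (some v, st.2 ++ [x]) else st) ((none : Option Int), ([] : List Int))
      coords ++ st.2.reverse.map (fun x => (x, y))) coords
    = coords ++ l.flatMap (fun p => rowBlk direction p.2 p.1) := by
  induction l generalizing coords with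
  | nil => simp
  | cons p l ih =>
    rw [List.foldl_cons, ih, List.flatMap_cons, ← List.append_assoc]
    congr 2
    by_cases hdir : direction = -1
    · simp only [if_pos hdir]
      unfold rowBlk
      rw [if_pos hdir, PySem.List.pyRange_zero_natCast, List.range_eq_range',
        scanF p.2 p.2.length (le_refl _)]
      unfold blkP
      rw [List.take_length, ← List.map_reverse, List.map_map, List.range_eq_range']
      rfl
    · simp only [if_neg hdir]
      unfold rowBlk
      rw [if_neg hdir]
      have h1 : PySem.List.pyRange ((p.2.length : Int) - 1) (-1) (-1)
          = ((List.range' 0 p.2.length).reverse).map (fun (i : Nat) => (i : Int)) := by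
        rw [PySem.List.pyRange_neg_one_eq_reverse]
        have h3 : (p.2.length : Int) - 1 + 1 = (p.2.length : Int) := by ring
        have h4 : (-1 : Int) + 1 = ((0 : Nat) : Int) := by norm_num
        rw [h3, h4]
        rw [show PySem.List.pyRange ((0 : Nat) : Int) ((p.2.length : Nat) : Int) 1
            = (List.range p.2.length).map (fun (k : Nat) => (k : Int)) from
          PySem.List.pyRange_zero_natCast p.2.length]
        rw [List.range_eq_range', List.map_reverse]
      rw [h1, scanBk p.2 p.2.length 0 (by omega)]
      unfold blkS
      rw [← List.map_reverse, List.reverse_reverse, List.map_map, List.range_eq_range']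
      rfl

-- A's grid fold produces the concatenation of per-row blocks (y from grid.index)
theorem Afold (grid : List (List Int)) (direction : Int) :
    ∀ (rows : List (List Int)) (acc : List (Int × Int)),
    rows.foldl (fun acc row0 =>
      let y : Int := ((PySem.List.index? grid row0).getD 0 : Nat)
      let row := if direction = -1 then row0.reverse else row0
      (PySem.List.pyRange 0 (row.length : Int) 1).foldl (fun acc i =>
        let value := (PySem.List.pyGet? row i).getD 0
        let bigger := (PySem.List.slice row (some (i + 1)) (some (row.length : Int))).foldl
          (fun b element => if value ≤ element then false else b) true
        if bigger then
          acc ++ [(if direction = -1 then (row.length : Int) - i - 1 else i, y)]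
        else acc) acc) acc
    = acc ++ rows.flatMap (fun r => rowBlk direction r (((PySem.List.index? grid r).getD 0 : Nat) : Int)) := by
  intro rows
  induction rows with
  | nil => intro acc; simp
  | cons r rows ih =>
    intro acc
    rw [List.foldl_cons, ih, List.flatMap_cons, ← List.append_assoc]
    congr 2
    by_cases hdir : direction = -1
    · simp only [if_pos hdir]
      rw [A_inner r.reverse (((PySem.List.index? grid r).getD 0 : Nat) : Int)
        (fun i => (r.reverse.length : Int) - i - 1) acc]
      unfold rowBlk
      rw [if_pos hdir, ← blk_reverse]
    · simp only [if_neg hdir]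
      rw [A_inner r (((PySem.List.index? grid r).getD 0 : Nat) : Int) (fun i => i) acc]
      unfold rowBlk
      rw [if_neg hdir]
      rfl

theorem rowBlk_nil (direction : Int) (y : Int) : rowBlk direction [] y = [] := by
  unfold rowBlk blkP blkS
  split <;> simp

-- alignment of A's grid.index-based y with B's enumerate-based y, outside D_
theorem flatEq (direction : Int) (grid : List (List Int))
    (hD : ∀ r ∈ grid, r ≠ [] → grid.count r ≤ 1) :
    ∀ (suf pre : List (List Int)), grid = pre ++ suf →
    suf.flatMap (fun r => rowBlk direction r (((PySem.List.index? grid r).getD 0 : Nat) : Int))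
    = (PySem.List.enumerate suf (pre.length : Int)).flatMap (fun p => rowBlk direction p.2 p.1) := by
  intro suf
  induction suf with
  | nil => intro pre _; simp [PySem.List.enumerate]
  | cons r suf ih =>
    intro pre hg
    rw [List.flatMap_cons, PySem.List.enumerate_cons, List.flatMap_cons]
    have htail := ih (pre ++ [r]) (by simp [hg])
    simp only [List.length_append, List.length_cons, List.length_nil] at htail
    push_cast at htail
    rw [htail]
    congr 1
    by_cases hr : r = []
    · subst hr; rw [rowBlk_nil, rowBlk_nil]
    · have hmem : r ∈ grid := by rw [hg]; simp
      have hcount := hD r hmem hr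
      have hnotpre : r ∉ pre := by
        intro hp
        have h1 : 1 ≤ pre.count r := List.one_le_count_iff.mpr hp
        have h2 : grid.count r = pre.count r + (r :: suf).count r := by
          rw [hg, List.count_append]
        have h3 : 1 ≤ (r :: suf).count r := by
          apply List.one_le_count_iff.mpr; simp
        omega
      have hidx : PySem.List.index? grid r = some pre.length := by
        rw [PySem.List.index?_eq_some_iff]
        exact ⟨pre, suf, hg, rfl, hnotpre⟩
      rw [hidx]
      rfl


-- length of a per-row block (independent of y)
def cnt (direction : Int) (row : List Int) : Nat :=
  if direction = -1 then ((List.range row.length).filter (condP row)).length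
  else ((List.range row.length).filter (condS row)).length

theorem snd_rowBlk (d : Int) (row : List Int) (y : Int) :
    (rowBlk d row y).map Prod.snd = List.replicate (cnt d row) y := by
  unfold rowBlk cnt blkP blkS
  split
  · simp [List.map_map, Function.comp_def, List.map_const']
  · simp [List.map_map, Function.comp_def, List.map_const']

theorem cnt_pos (d : Int) (row : List Int) (hr : row ≠ []) : 0 < cnt d row := by
  have hn : 0 < row.length := List.length_pos_of_ne_nil hr
  unfold cnt
  split
  · apply List.length_pos_of_mem (a := 0)
    apply List.mem_filter.mpr
    refine ⟨List.mem_range.mpr hn, ?_⟩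
    unfold condP
    simp
  · apply List.length_pos_of_mem (a := row.length - 1)
    apply List.mem_filter.mpr
    refine ⟨List.mem_range.mpr (by omega), ?_⟩
    unfold condS
    have h1 : row.length - 1 + 1 = row.length := by omega
    rw [h1, List.drop_length]
    simp

theorem flatten_replicate_eq : ∀ (l : List (Nat × (Int × Int))),
    l.flatMap (fun q => List.replicate q.1 q.2.1) = l.flatMap (fun q => List.replicate q.1 q.2.2) →
    ∀ q ∈ l, 0 < q.1 → q.2.1 = q.2.2 := by
  intro l
  induction l with
  | nil => intro _ q hq; simp at hq
  | cons a l ih =>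
    intro h q hq hpos
    rw [List.flatMap_cons, List.flatMap_cons] at h
    obtain ⟨h1, h2⟩ := List.append_inj h (by simp)
    rcases List.mem_cons.mp hq with rfl | hq
    · have hmem : q.2.1 ∈ List.replicate q.1 q.2.2 := by
        rw [← h1]
        exact List.mem_replicate.mpr ⟨by omega, rfl⟩
      exact List.eq_of_mem_replicate hmem
    · exact ih h2 q hq hpos

-- a list with two occurrences of a splits around them
theorem two_le_count_split {α : Type} [BEq α] [LawfulBEq α] (a : α) :
    ∀ (l : List α), 2 ≤ l.count a → ∃ l1 l2 l3, l = l1 ++ a :: (l2 ++ a :: l3) := by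
  intro l
  induction l with
  | nil => intro h; simp at h
  | cons x l ih =>
    intro h
    by_cases hx : x = a
    · subst hx
      rw [List.count_cons_self] at h
      have hmem : x ∈ l := List.count_pos_iff.mp (by omega)
      obtain ⟨l2, l3, he⟩ := List.append_of_mem hmem
      exact ⟨[], l2, l3, by simp [he]⟩
    · have h' : 2 ≤ l.count a := by simpa [List.count_cons, hx] using h
      obtain ⟨l1, l2, l3, he⟩ := ih h'
      exact ⟨x :: l1, l2, l3, by simp [he]⟩

-- ===== VERDICT (by name: the statement is the Claim_ definition above) =====
theorem find_coord_spec : Claim_unchanged_find_coord := by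
  intro grid direction _ hD
  unfold find_coord find_coord_alt
  rw [Afold grid direction grid, Bfold direction]
  rw [flatEq direction grid ?hnd grid [] (by simp)]
  · rfl
  · intro r hmem hne
    by_contra hgt
    exact hD ⟨r, hmem, hne, by omega⟩

theorem find_coord_changed : Claim_changed_find_coord := by
  unfold Claim_changed_find_coord; decide

theorem find_coord_tight : Claim_exact_find_coord := by
  intro grid direction _ hD heq
  obtain ⟨r, hmem, hr, hcnt⟩ := hD
  have hA : find_coord grid direction
      = grid.flatMap (fun rr => rowBlk direction rr (((PySem.List.index? grid rr).getD 0 : Nat) : Int)) := by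
    unfold find_coord
    rw [Afold grid direction grid]
    rfl
  have hB : find_coord_alt grid direction
      = (PySem.List.enumerate grid 0).flatMap (fun p => rowBlk direction p.2 p.1) := by
    unfold find_coord_alt
    rw [Bfold direction]
    rfl
  rw [hA, hB] at heq
  have hsnd := congrArg (List.map Prod.snd) heq
  rw [List.map_flatMap, List.map_flatMap] at hsnd
  simp only [snd_rowBlk] at hsnd
  have flatMap_enum : ∀ (g : List Int → List Int),
      grid.flatMap g = (PySem.List.enumerate grid 0).flatMap (fun p => g p.2) := by
    intro g
    conv_lhs => rw [← PySem.List.map_snd_enumerate grid 0]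
    rw [List.flatMap_map]
  rw [flatMap_enum] at hsnd
  have hfl : ((PySem.List.enumerate grid 0).map
        (fun p => (cnt direction p.2, ((((PySem.List.index? grid p.2).getD 0 : Nat) : Int), p.1)))).flatMap
          (fun q => List.replicate q.1 q.2.1)
      = ((PySem.List.enumerate grid 0).map
        (fun p => (cnt direction p.2, ((((PySem.List.index? grid p.2).getD 0 : Nat) : Int), p.1)))).flatMap
          (fun q => List.replicate q.1 q.2.2) := by
    rw [List.flatMap_map, List.flatMap_map]
    exact hsnd
  have hkey : ∀ p ∈ PySem.List.enumerate grid 0, 0 < cnt direction p.2 →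
      (((PySem.List.index? grid p.2).getD 0 : Nat) : Int) = p.1 := by
    intro p hp hpos
    exact flatten_replicate_eq _ hfl _ (List.mem_map_of_mem hp) hpos
  obtain ⟨l1, l2, l3, hg⟩ := two_le_count_split r grid hcnt
  have hg1 : grid[l1.length]? = some r := by
    rw [hg, List.getElem?_append_right (le_refl _)]
    simp
  have hg2 : grid[l1.length + (l2.length + 1)]? = some r := by
    rw [hg, List.getElem?_append_right (by omega)]
    have h1 : l1.length + (l2.length + 1) - l1.length = l2.length + 1 := by omega
    rw [h1, List.getElem?_cons_succ, List.getElem?_append_right (le_refl _)]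
    simp
  obtain ⟨hb1, e1⟩ := List.getElem?_eq_some_iff.mp hg1
  obtain ⟨hb2, e2⟩ := List.getElem?_eq_some_iff.mp hg2
  have hm1 : (((l1.length : Nat) : Int), r) ∈ PySem.List.enumerate grid 0 := by
    rw [PySem.List.mem_enumerate_iff]
    exact ⟨l1.length, hb1, by rw [e1]; simp⟩
  have hm2 : (((l1.length + (l2.length + 1) : Nat) : Int), r) ∈ PySem.List.enumerate grid 0 := by
    rw [PySem.List.mem_enumerate_iff]
    exact ⟨l1.length + (l2.length + 1), hb2, by rw [e2]; simp⟩
  have hy1 := hkey _ hm1 (cnt_pos direction r hr)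
  have hy2 := hkey _ hm2 (cnt_pos direction r hr)
  simp only at hy1 hy2
  omega
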